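-- pv_equiv track=rewrite | github.com/Darturo9/Analytics-Python | productos/LoginUsuarios/QBR_1_2026/dashboards/dashboard_qbr1_arbol_rtm.py | detectar_columna_codigo
-- ===== SOURCE A (Python) =====
-- def normalizar_nombre_columna(nombre: str) -> str:
--     return (
--         str(nombre)
--         .strip()
--         .lower()
--         .replace("á", "a")
--         .replace("é", "e")
--         .replace("í", "i")
--         .replace("ó", "o")
--         .replace("ú", "u")
--         .replace(" ", "_")
--     )
--
-- def detectar_columna_codigo(columnas: list[str]) -> str | None:
--     columnas_norm = {c: normalizar_nombre_columna(c) for c in columnas}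
--     for original, normalizada in columnas_norm.items():
--         if "codigo" in normalizada and ("cliente" in normalizada or "usuario" in normalizada):
--             return original
--     for original, normalizada in columnas_norm.items():
--         if normalizada in {"cif", "cldoc", "codigo", "cliente", "clientes"}:
--             return original
--     return None
-- ===== SOURCE B (Python) =====
-- def normalizar_nombre_columna(nombre: str) -> str:
--     return (
--         str(nombre)
--         .strip()
--         .lower()
--         .replace("á", "a")
--         .replace("é", "e")
--         .replace("í", "i")
--         .replace("ó", "o")
--         .replace("ú", "u")
--         .replace(" ", "_")
--     )
--
-- def detectar_columna_codigo(columnas: list[str]) -> str | None: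
--     fallback = None
--     for c in columnas:
--         n = normalizar_nombre_columna(c)
--         if "codigo" in n and ("cliente" in n or "usuario" in n):
--             return c
--         if fallback is None and n in ("cif", "cldoc", "codigo", "cliente", "clientes"):
--             fallback = c
--     return fallback
-- ===== Notes on version B (the rewrite author's own statement) =====
-- stated objective: simpler
-- what changed: Replaces the dict comprehension plus two sequential scans over the dict's items with a single pass over the list that returns immediately on a priority-1 match and carries the first priority-2 column as a fallback.
import Mathlib
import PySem

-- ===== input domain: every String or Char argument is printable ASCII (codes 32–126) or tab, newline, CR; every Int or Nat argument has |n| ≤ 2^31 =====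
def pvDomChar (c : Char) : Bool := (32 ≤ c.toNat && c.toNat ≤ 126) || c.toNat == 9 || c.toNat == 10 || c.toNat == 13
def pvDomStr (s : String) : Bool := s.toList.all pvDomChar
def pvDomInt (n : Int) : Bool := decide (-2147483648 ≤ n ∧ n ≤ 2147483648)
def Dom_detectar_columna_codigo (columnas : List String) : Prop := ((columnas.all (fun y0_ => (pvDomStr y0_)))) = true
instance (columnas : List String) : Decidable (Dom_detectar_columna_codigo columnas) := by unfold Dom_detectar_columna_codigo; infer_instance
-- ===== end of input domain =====

-- B replaces A's dict comprehension plus two sequential scans with one pass over the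
-- list carrying a fallback candidate (objective: simpler; same asymptotic cost).

-- ===== PORT A =====
-- normalizar_nombre_columna (shared helper of both Pythons)
def pvNorm (nombre : String) : String :=
  PySem.Str.replace (PySem.Str.replace (PySem.Str.replace (PySem.Str.replace
    (PySem.Str.replace (PySem.Str.replace (PySem.Str.lower (PySem.Str.strip nombre))
      "\u00e1" "a") "\u00e9" "e") "\u00ed" "i") "\u00f3" "o") "\u00fa" "u") " " "_"

-- '"codigo" in n and ("cliente" in n or "usuario" in n)'
def pvP1 (n : String) : Bool :=
  PySem.Str.isIn "codigo" n && (PySem.Str.isIn "cliente" n || PySem.Str.isIn "usuario" n)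

-- 'n in {"cif", "cldoc", "codigo", "cliente", "clientes"}'
def pvP2 (n : String) : Bool :=
  n == "cif" || n == "cldoc" || n == "codigo" || n == "cliente" || n == "clientes"

def detectar_columna_codigo (columnas : List String) : Option String :=
  let columnas_norm : PySem.Dict String String :=
    columnas.foldl (fun d c => d.insert c (pvNorm c)) PySem.Dict.empty
  match columnas_norm.items.find? (fun p => pvP1 p.2) with
  | some p => some p.1
  | none =>
    match columnas_norm.items.find? (fun p => pvP2 p.2) with
    | some p => some p.1
    | none => none

-- ===== PORT B =====
-- the single pass of Source B: return on a priority-1 match, carry the first priority-2 column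
def pvGoB : List String → Option String → Option String
  | [], fallback => fallback
  | c :: rest, fallback =>
    let n := pvNorm c
    if pvP1 n then some c
    else pvGoB rest (if fallback.isNone && pvP2 n then some c else fallback)

def detectar_columna_codigo_alt (columnas : List String) : Option String :=
  pvGoB columnas none

-- ===== PRECONDITION & SPEC =====
def Spec_detectar_columna_codigo (columnas : List String) (out : Option String) : Prop := out = detectar_columna_codigo_alt columnas
instance (columnas : List String) (out : Option String) : Decidable (Spec_detectar_columna_codigo columnas out) := by unfold Spec_detectar_columna_codigo; infer_instance

-- ===== CLAIM (what is proved, stated in full; the proofs are below) =====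
def Claim_equal_detectar_columna_codigo : Prop := ∀ (columnas : List String), Dom_detectar_columna_codigo columnas → Spec_detectar_columna_codigo columnas (detectar_columna_codigo columnas)

-- ===== LEMMAS AND PROOFS =====

-- a first match at an element already present earlier is the same first match
theorem pvFind_append_cons_mem {α : Type} (p : α → Bool) (l cs : List α) (c : α)
    (h : c ∈ l) : (l ++ c :: cs).find? p = (l ++ cs).find? p := by
  rw [List.find?_append, List.find?_append]
  by_cases hp : p c = true
  · obtain ⟨x, hx⟩ := Option.isSome_iff_exists.mp (List.find?_isSome.mpr ⟨c, h, hp⟩)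
    simp [hx]
  · simp [hp]

-- the dict loop: find? over the resulting items = find? over the key list, paired with pvNorm
theorem pvItems_find (q : String → Bool) :
    ∀ (cs l : List String) (d : PySem.Dict String String),
    d.items = l.map (fun c => (c, pvNorm c)) →
    ((cs.foldl (fun d c => d.insert c (pvNorm c)) d).items.find? (fun p => q p.2))
      = ((l ++ cs).find? (fun c => q (pvNorm c))).map (fun c => (c, pvNorm c)) := by
  intro cs
  induction cs with
  | nil =>
    intro l d hd
    simp only [List.foldl_nil, List.append_nil, hd, List.find?_map]
    rfl
  | cons c cs ih =>
    intro l d hd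
    simp only [List.foldl_cons]
    by_cases hc : d.contains c = true
    · have hmem : c ∈ l := by
        have := (PySem.Dict.contains_iff_mem_keys (d := d) (k := c)).mp hc
        simpa [PySem.Dict.keys, hd, List.map_map, Function.comp] using this
      have hitems : (d.insert c (pvNorm c)).items = l.map (fun c => (c, pvNorm c)) := by
        rw [PySem.Dict.items_insert_of_contains _ _ hc, hd, List.map_map]
        apply List.map_congr_left
        intro x _
        by_cases hx : x = c
        · simp [hx]
        · simp [Function.comp, hx]
      rw [ih l _ hitems, pvFind_append_cons_mem _ _ _ _ hmem]
    · have hitems : (d.insert c (pvNorm c)).items = (l ++ [c]).map (fun c => (c, pvNorm c)) := by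
        rw [PySem.Dict.items_insert_of_not_contains _ _ (by simpa using hc), hd]
        simp
      rw [ih (l ++ [c]) _ hitems, List.append_assoc]
      rfl

-- characterization of B's single pass
theorem pvGoB_eq (cs : List String) : ∀ (fb : Option String),
    pvGoB cs fb
      = ((cs.find? (fun c => pvP1 (pvNorm c))).or
          (fb.or (cs.find? (fun c => pvP2 (pvNorm c))))) := by
  induction cs with
  | nil => intro fb; simp [pvGoB]
  | cons c cs ih =>
    intro fb
    by_cases h1 : pvP1 (pvNorm c) = true
    · simp [pvGoB, h1, List.find?_cons]
    · rw [pvGoB]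
      simp only [ih, List.find?_cons, h1]
      cases fb with
      | some x => simp
      | none =>
        by_cases h2 : pvP2 (pvNorm c) = true <;> simp [h2]

-- ===== VERDICT (by name: the statement is the Claim_ definition above) =====
theorem detectar_columna_codigo_spec : Claim_equal_detectar_columna_codigo := by
  intro columnas _
  unfold Spec_detectar_columna_codigo detectar_columna_codigo detectar_columna_codigo_alt
  rw [pvGoB_eq]
  have h1 := pvItems_find pvP1 columnas [] PySem.Dict.empty (by rfl)
  have h2 := pvItems_find pvP2 columnas [] PySem.Dict.empty (by rfl)
  simp only [List.nil_append] at h1 h2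
  simp only [h1, h2]
  cases columnas.find? (fun c => pvP1 (pvNorm c)) with
  | some x => simp
  | none =>
    simp only [Option.map_none, Option.none_or]
    cases columnas.find? (fun c => pvP2 (pvNorm c)) <;> simp
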